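-- pv_equiv track=rewrite | github.com/KjeldSchmidt/advent-of-code-2021 | 17-solution.py | get_possible_y_speeds
-- ===== SOURCE A (Python) =====
-- y_range = (-136, -86)
--
-- def y_pos_calc(y_speed, step_count):
--     return sum([y_speed - i for i in range(step_count)])
--
-- def get_possible_y_speeds(min_steps, max_steps):
--     possible_speeds = set()
--     for step_count in range(min_steps, max_steps + 1):
--         for speed in range(y_range[0], max_steps):
--             if y_pos_calc(speed, step_count) in range(y_range[0], y_range[1] + 1):
--                 possible_speeds.add(speed)
--
--     possible_speeds = sorted(list(possible_speeds))
--
--     return possible_speeds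
-- ===== SOURCE B (Python) =====
-- y_range = (-136, -86)
--
--
-- def get_possible_y_speeds(min_steps, max_steps):
--     # Per speed, test each step count with the arithmetic-series closed form
--     # (sum_{i<k}(speed - i) = speed*k - k*(k-1)//2) instead of re-summing, with
--     # early exit; scanning speeds in ascending order builds the result sorted, no set.
--     if min_steps > max_steps:  # no admissible step count
--         return []
--
--     def hits(speed):
--         for step_count in range(min_steps, max_steps + 1):
--             pos = speed * step_count - step_count * (step_count - 1) // 2 if step_count > 0 else 0
--             if y_range[0] <= pos <= y_range[1]:
--                 return True
--         return False
--
--     return [speed for speed in range(y_range[0], max_steps) if hits(speed)]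
-- ===== Notes on version B (the rewrite author's own statement) =====
-- stated objective: alternative
-- what changed: Replaces the per-(step,speed) re-summation over range(step_count) and the set-then-sort with a closed-form arithmetic-series position check per (speed,step) pair with early exit, scanning speeds in ascending order so the output is built sorted directly.
import Mathlib
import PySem

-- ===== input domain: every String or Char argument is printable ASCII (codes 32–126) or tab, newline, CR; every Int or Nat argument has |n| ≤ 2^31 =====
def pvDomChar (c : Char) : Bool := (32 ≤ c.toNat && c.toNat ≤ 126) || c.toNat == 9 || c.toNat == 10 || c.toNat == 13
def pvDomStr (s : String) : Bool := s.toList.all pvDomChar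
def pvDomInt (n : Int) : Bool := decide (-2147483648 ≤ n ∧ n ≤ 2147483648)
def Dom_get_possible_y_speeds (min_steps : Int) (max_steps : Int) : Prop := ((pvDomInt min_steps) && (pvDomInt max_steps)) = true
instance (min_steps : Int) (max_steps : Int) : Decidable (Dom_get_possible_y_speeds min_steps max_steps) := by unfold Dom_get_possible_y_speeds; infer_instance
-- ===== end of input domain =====

-- B replaces A's per-pair re-summation and set-then-sort with a closed-form position
-- check over speeds scanned in ascending order (objective: alternative algorithm).

-- ===== PORT A =====
def y_pos_calc (y_speed : Int) (step_count : Int) : Int :=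
  ((PySem.List.pyRange 0 step_count 1).map (fun i => y_speed - i)).sum

def get_possible_y_speeds (min_steps : Int) (max_steps : Int) : List Int :=
  let possible_speeds : List Int :=
    (PySem.List.pyRange min_steps (max_steps + 1) 1).foldl (fun acc step_count =>
      (PySem.List.pyRange (-136) max_steps 1).foldl (fun acc2 speed =>
        -- 'v in range(-136, -85)' on an int is exactly the interval test -136 ≤ v ≤ -86
        if -136 ≤ y_pos_calc speed step_count ∧ y_pos_calc speed step_count ≤ -86
        then PySem.Set.add acc2 speed else acc2) acc)
      (PySem.Set.ofList [])
  PySem.List.sorted possible_speeds (fun x => x) false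

-- ===== PORT B =====
def gy_hits (min_steps : Int) (max_steps : Int) (speed : Int) : Bool :=
  (PySem.List.pyRange min_steps (max_steps + 1) 1).any (fun k =>
    let pos := if 0 < k then speed * k - PySem.Int.floordiv (k * (k - 1)) 2 else 0
    decide (-136 ≤ pos ∧ pos ≤ -86))

def get_possible_y_speeds_alt (min_steps : Int) (max_steps : Int) : List Int :=
  if max_steps < min_steps then []  -- no admissible step count
  else (PySem.List.pyRange (-136) max_steps 1).filter (fun s => gy_hits min_steps max_steps s)

-- ===== PRECONDITION & SPEC =====
def Spec_get_possible_y_speeds (min_steps : Int) (max_steps : Int) (out : List Int) : Prop := out = get_possible_y_speeds_alt min_steps max_steps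
instance (min_steps : Int) (max_steps : Int) (out : List Int) : Decidable (Spec_get_possible_y_speeds min_steps max_steps out) := by unfold Spec_get_possible_y_speeds; infer_instance

-- ===== CLAIM (what is proved, stated in full; the proofs are below) =====
def Claim_equal_get_possible_y_speeds : Prop := ∀ (min_steps : Int) (max_steps : Int), Dom_get_possible_y_speeds min_steps max_steps → Spec_get_possible_y_speeds min_steps max_steps (get_possible_y_speeds min_steps max_steps)

-- ===== LEMMAS AND PROOFS =====

-- closed form of the arithmetic series A sums per pair
theorem two_mul_ypos (s : Int) (n : Nat) :
    2 * y_pos_calc s (n : Int) = 2 * s * n - n * ((n : Int) - 1) := by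
  induction n with
  | zero => simp [y_pos_calc, PySem.List.pyRange_one_eq_nil]
  | succ m ih =>
      have h : ((m : Int) + 1) = ((m + 1 : Nat) : Int) := by push_cast; ring
      rw [y_pos_calc, ← h, PySem.List.pyRange_one_succ_right (by positivity)]
      rw [y_pos_calc] at ih
      simp only [List.map_append, List.sum_append, List.map_cons, List.map_nil,
        List.sum_cons, List.sum_nil]
      linear_combination ih

theorem ypos_closed (s k : Int) :
    y_pos_calc s k = if 0 < k then s * k - PySem.Int.floordiv (k * (k - 1)) 2 else 0 := by
  by_cases hk : 0 < k
  · simp only [hk, if_true]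
    obtain ⟨n, rfl⟩ : ∃ n : Nat, k = (n : Int) := ⟨k.toNat, (Int.toNat_of_nonneg hk.le).symm⟩
    have h2 := two_mul_ypos s n
    have hq : PySem.Int.floordiv ((n : Int) * ((n : Int) - 1)) 2
        = s * n - y_pos_calc s n := by
      rw [PySem.Int.floordiv_eq_iff_of_pos (by omega)]
      constructor <;> nlinarith [h2]
    rw [hq]; ring
  · simp only [hk, if_false]
    rw [y_pos_calc, PySem.List.pyRange_one_eq_nil (by omega)]
    simp

-- membership / nodup of the inner 'if cond then add' loop
theorem mem_foldl_addif (cond : Int → Prop) [DecidablePred cond]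
    (l : List Int) (s : List Int) (y : Int) :
    y ∈ l.foldl (fun acc x => if cond x then PySem.Set.add acc x else acc) s ↔
      y ∈ s ∨ (y ∈ l ∧ cond y) := by
  induction l generalizing s with
  | nil => simp
  | cons x l ih =>
      simp only [List.foldl_cons, ih, List.mem_cons]
      by_cases hx : cond x
      · simp only [hx, if_true, PySem.Set.mem_add]
        constructor
        · rintro (⟨h | rfl⟩ | h) <;> tauto
        · rintro (h | ⟨(rfl | h), hc⟩) <;> tauto
      · simp only [hx, if_false]
        constructor
        · rintro (h | h) <;> tauto
        · rintro (h | ⟨(rfl | h), hc⟩) <;> tauto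

theorem nodup_foldl_addif (cond : Int → Prop) [DecidablePred cond]
    (l : List Int) (s : List Int) (hs : s.Nodup) :
    (l.foldl (fun acc x => if cond x then PySem.Set.add acc x else acc) s).Nodup := by
  induction l generalizing s with
  | nil => simpa
  | cons x l ih =>
      simp only [List.foldl_cons]
      split
      · exact ih _ (PySem.Set.nodup_add s x hs)
      · exact ih _ hs

-- A's whole set-building double loop, characterised
theorem mem_outer (cond : Int → Int → Prop) [∀ k, DecidablePred (cond k)]
    (steps speeds : List Int) (s : List Int) (y : Int) :
    y ∈ steps.foldl (fun acc k =>
        speeds.foldl (fun acc2 x => if cond k x then PySem.Set.add acc2 x else acc2) acc) s ↔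
      y ∈ s ∨ (y ∈ speeds ∧ ∃ k ∈ steps, cond k y) := by
  induction steps generalizing s with
  | nil => simp
  | cons k steps ih =>
      simp only [List.foldl_cons, ih, mem_foldl_addif, List.mem_cons]
      constructor
      · rintro ((h | ⟨h1, h2⟩) | ⟨h1, k', hk', h2⟩)
        · exact Or.inl h
        · exact Or.inr ⟨h1, k, Or.inl rfl, h2⟩
        · exact Or.inr ⟨h1, k', Or.inr hk', h2⟩
      · rintro (h | ⟨h1, k', (rfl | hk'), h2⟩)
        · exact Or.inl (Or.inl h)
        · exact Or.inl (Or.inr ⟨h1, h2⟩)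
        · exact Or.inr ⟨h1, k', hk', h2⟩

theorem nodup_outer (cond : Int → Int → Prop) [∀ k, DecidablePred (cond k)]
    (steps speeds : List Int) (s : List Int) (hs : s.Nodup) :
    (steps.foldl (fun acc k =>
        speeds.foldl (fun acc2 x => if cond k x then PySem.Set.add acc2 x else acc2) acc) s).Nodup := by
  induction steps generalizing s with
  | nil => simpa
  | cons k steps ih =>
      simp only [List.foldl_cons]
      exact ih _ (nodup_foldl_addif _ _ _ hs)

-- B's per-speed test, characterised
theorem gy_hits_iff (min_steps max_steps speed : Int) :
    gy_hits min_steps max_steps speed = true ↔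
      ∃ k ∈ PySem.List.pyRange min_steps (max_steps + 1) 1,
        -136 ≤ y_pos_calc speed k ∧ y_pos_calc speed k ≤ -86 := by
  simp only [gy_hits, List.any_eq_true, decide_eq_true_eq]
  constructor
  · rintro ⟨k, hk, h⟩
    exact ⟨k, hk, by rw [ypos_closed]; exact h⟩
  · rintro ⟨k, hk, h⟩
    exact ⟨k, hk, by rw [ypos_closed] at h; exact h⟩

-- B's early return coincides with the (then all-false) filter
theorem alt_eq_filter (min_steps max_steps : Int) :
    get_possible_y_speeds_alt min_steps max_steps
      = (PySem.List.pyRange (-136) max_steps 1).filter (fun s => gy_hits min_steps max_steps s) := by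
  unfold get_possible_y_speeds_alt
  split
  · rename_i h
    have hf : ∀ s : Int, gy_hits min_steps max_steps s = false := by
      intro s
      unfold gy_hits
      rw [PySem.List.pyRange_one_eq_nil (by omega)]
      rfl
    simp [hf]
  · rfl

-- ===== VERDICT (by name: the statement is the Claim_ definition above) =====
theorem get_possible_y_speeds_spec : Claim_equal_get_possible_y_speeds := by
  intro min_steps max_steps _
  unfold Spec_get_possible_y_speeds get_possible_y_speeds
  set cond : Int → Int → Prop :=
    fun k x => -136 ≤ y_pos_calc x k ∧ y_pos_calc x k ≤ -86 with hcond
  set steps := PySem.List.pyRange min_steps (max_steps + 1) 1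
  set speeds := PySem.List.pyRange (-136) max_steps 1 with hspeeds
  show PySem.List.sorted
      (steps.foldl (fun acc k =>
        speeds.foldl (fun acc2 x => if cond k x then PySem.Set.add acc2 x else acc2) acc)
        (PySem.Set.ofList [])) (fun x => x) false
    = get_possible_y_speeds_alt min_steps max_steps
  apply PySem.List.sorted_eq_of_perm_of_pairwise_lt
  · -- the filtered ascending scan is a permutation of A's set
    rw [List.perm_ext_iff_of_nodup]
    · intro y
      rw [alt_eq_filter, List.mem_filter, mem_outer, gy_hits_iff]
      simp only [PySem.Set.ofList, List.foldl_nil, ← hspeeds]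
      tauto
    · rw [alt_eq_filter]
      exact List.Nodup.filter _ (PySem.List.nodup_pyRange_one _ _)
    · exact nodup_outer cond steps speeds _ (by simp [PySem.Set.ofList])
  · rw [alt_eq_filter]
    exact List.Pairwise.filter _ (PySem.List.pairwise_lt_pyRange_one _ _)
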